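-- pv_equiv track=rewrite | github.com/WHO-Collaboratory/pandemic-simulator-compartment | compartment/helpers.py | create_compartment_list
-- ===== SOURCE A (Python) =====
-- def create_compartment_list(disease_nodes):
--     """ Map disease nodes to compartment abbreviations """
--     node_to_compartment = {
--         "susceptible": "S",
--         "exposed": "E",
--         "infected": "I",
--         "hospitalized": "H",
--         "deceased": "D",
--         "recovered": "R"
--     }
--     master_order = ["S", "E", "I", "H", "D", "R"]
--     compartments = [node_to_compartment[node['id']] for node in disease_nodes if node['id'] in node_to_compartment]
--
--     return sorted(compartments, key=lambda x: master_order.index(x))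
-- ===== SOURCE B (Python) =====
-- def create_compartment_list(disease_nodes):
--     """ Map disease nodes to compartment abbreviations """
--     node_to_compartment = {
--         "susceptible": "S",
--         "exposed": "E",
--         "infected": "I",
--         "hospitalized": "H",
--         "deceased": "D",
--         "recovered": "R"
--     }
--     counts = {}
--     for node in disease_nodes:
--         letter = node_to_compartment.get(node['id'])
--         if letter is not None:
--             counts[letter] = counts.get(letter, 0) + 1
--     return [letter
--             for letter in ["S", "E", "I", "H", "D", "R"]
--             for _ in range(counts.get(letter, 0))]
-- ===== Notes on version B (the rewrite author's own statement) =====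
-- stated objective: alternative
-- what changed: B replaces map-every-node-then-sort-by-master_order.index with a single counting pass into a dict followed by one traversal of the fixed master order that emits each letter by its multiplicity (counting sort by grouping instead of comparison sort).
import Mathlib
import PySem

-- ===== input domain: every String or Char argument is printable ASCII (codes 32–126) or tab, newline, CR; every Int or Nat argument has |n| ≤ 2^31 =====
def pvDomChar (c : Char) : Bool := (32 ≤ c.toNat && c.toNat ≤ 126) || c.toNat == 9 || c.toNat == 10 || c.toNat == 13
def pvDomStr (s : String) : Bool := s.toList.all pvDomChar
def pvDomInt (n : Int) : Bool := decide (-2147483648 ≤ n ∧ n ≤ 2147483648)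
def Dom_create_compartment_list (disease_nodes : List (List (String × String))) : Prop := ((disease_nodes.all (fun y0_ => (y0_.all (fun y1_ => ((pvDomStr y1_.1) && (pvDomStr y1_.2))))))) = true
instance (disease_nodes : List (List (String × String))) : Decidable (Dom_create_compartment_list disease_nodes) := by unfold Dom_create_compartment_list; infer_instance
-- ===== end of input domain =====

-- B groups by iterating the fixed master order once over a count dictionary built in one pass,
-- instead of mapping every node and then sorting by master_order.index (objective: alternative decomposition).

-- the shared id -> compartment-letter table (a module-level constant in both programs)
def pvNtc : PySem.Dict String String :=
  PySem.Dict.ofList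
    [("susceptible", "S"), ("exposed", "E"), ("infected", "I"),
     ("hospitalized", "H"), ("deceased", "D"), ("recovered", "R")]

def pvMaster : List String := ["S", "E", "I", "H", "D", "R"]

-- ===== PORT A =====
-- the comprehension: for node in disease_nodes, if node['id'] in node_to_compartment, yield node_to_compartment[node['id']]
-- (node['id'] raising KeyError — get? = none — is excluded by Pre_; the [] branch there is only a totality guard)
def pvLetterA (node : List (String × String)) : List String :=
  match (PySem.Dict.mk node).get? "id" with
  | none => []
  | some i =>
    match pvNtc.get? i with
    | some c => [c]
    | none => []

def pvCompA (disease_nodes : List (List (String × String))) : List String :=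
  disease_nodes.flatMap pvLetterA

def create_compartment_list (disease_nodes : List (List (String × String))) : List String :=
  PySem.List.sorted (pvCompA disease_nodes)
    (fun x => ((PySem.List.index? pvMaster x).getD 6 : Nat)) false
  -- key = master_order.index(x); the .getD 6 default is a totality guard only: every
  -- compartment letter is a member of master_order, so Python's ValueError branch is unreachable

-- ===== PORT B =====
-- one iteration of B's counting loop: letter = node_to_compartment.get(node['id']);
-- if letter is not None: counts[letter] = counts.get(letter, 0) + 1
-- (the none branch also covers node['id'] KeyError, which Pre_ excludes: totality guard)
def pvStepB (d : PySem.Dict String Int) (node : List (String × String)) : PySem.Dict String Int :=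
  match (PySem.Dict.mk node).get? "id" with
  | none => d
  | some i =>
    match pvNtc.get? i with
    | some letter => d.insert letter (d.getD letter 0 + 1)
    | none => d

def create_compartment_list_alt (disease_nodes : List (List (String × String))) : List String :=
  let counts : PySem.Dict String Int := disease_nodes.foldl pvStepB PySem.Dict.empty
  pvMaster.flatMap (fun letter =>
    (PySem.List.pyRange 0 (counts.getD letter 0) 1).map (fun _ => letter))

-- ===== PRECONDITION & SPEC =====
-- Pre_ excludes exactly the nodes without an 'id' key, on which Python A raises KeyError.
def Pre_create_compartment_list (disease_nodes : List (List (String × String))) : Prop :=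
  ∀ node ∈ disease_nodes, ((PySem.Dict.mk node).get? "id").isSome
instance (disease_nodes : List (List (String × String))) : Decidable (Pre_create_compartment_list disease_nodes) := by unfold Pre_create_compartment_list; infer_instance
-- (e.g. [[("id", "infected")], [("id", "deceased")]] satisfies Pre_, while [[("name", "recovered")]] does not)

def pvWitness_create_compartment_list : (List (List (String × String))) :=
  [[("id", "infected")], [("id", "susceptible")], [("id", "other")], [("id", "infected")]]

def Spec_create_compartment_list (disease_nodes : List (List (String × String))) (out : List String) : Prop := out = create_compartment_list_alt disease_nodes
instance (disease_nodes : List (List (String × String))) (out : List String) : Decidable (Spec_create_compartment_list disease_nodes out) := by unfold Spec_create_compartment_list; infer_instance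

-- ===== CLAIM (what is proved, stated in full; the proofs are below) =====
def Claim_equal_create_compartment_list : Prop := ∀ (disease_nodes : List (List (String × String))), Dom_create_compartment_list disease_nodes → Pre_create_compartment_list disease_nodes → Spec_create_compartment_list disease_nodes (create_compartment_list disease_nodes)

-- ===== LEMMAS AND PROOFS =====

-- the master-order key and its left inverse on the six letters
def pvKey (x : String) : Nat := (PySem.List.index? pvMaster x).getD 6

-- canonical grouped form: each letter of the master order, repeated by its multiplicity
def pvCanon (comp : List String) : List String :=
  pvMaster.flatMap (fun c => List.replicate (comp.count c) c)

lemma pvNtc_value_mem_master {i c : String} (h : pvNtc.get? i = some c) : c ∈ pvMaster := by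
  simp [pvNtc, pysem] at h
  rw [show (PySem.Dict.ofList [("susceptible", "S"), ("exposed", "E"), ("infected", "I"),
      ("hospitalized", "H"), ("deceased", "D"), ("recovered", "R")] : PySem.Dict String String).items
      = [("susceptible", "S"), ("exposed", "E"), ("infected", "I"),
      ("hospitalized", "H"), ("deceased", "D"), ("recovered", "R")] from by decide] at h
  simp at h
  rcases h with ⟨_, h2⟩|⟨_, h2⟩|⟨_, h2⟩|⟨_, h2⟩|⟨_, h2⟩|⟨_, h2⟩ <;> simp [pvMaster, h2]

lemma pvCompA_mem_master {dn : List (List (String × String))} {x : String}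
    (hx : x ∈ pvCompA dn) : x ∈ pvMaster := by
  simp only [pvCompA, List.mem_flatMap] at hx
  obtain ⟨node, -, hx⟩ := hx
  unfold pvLetterA at hx
  cases hid : (PySem.Dict.mk node).get? "id" with
  | none => simp only [hid] at hx; cases hx
  | some i =>
    simp only [hid] at hx
    cases hc : pvNtc.get? i with
    | none => simp only [hc] at hx; cases hx
    | some c =>
      simp only [hc] at hx
      rcases List.mem_singleton.1 hx with rfl
      exact pvNtc_value_mem_master hc

-- two key-nondecreasing lists of compartment letters that are permutations of each other are equal
lemma pv_eq_of_perm_sorted {xs ys : List String}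
    (hperm : xs.Perm ys)
    (hxs : xs.Pairwise (fun a b => pvKey a ≤ pvKey b))
    (hys : ys.Pairwise (fun a b => pvKey a ≤ pvKey b))
    (hmem : ∀ a ∈ xs, a ∈ pvMaster) : xs = ys := by
  refine hperm.eq_of_pairwise ?_ hxs hys
  intro a b ha hb hab hba
  have ha' : a ∈ pvMaster := hmem a ha
  have hb' : b ∈ pvMaster := hmem b (hperm.mem_iff.2 hb)
  fin_cases ha' <;> fin_cases hb' <;> first | rfl | (exfalso; revert hab hba; decide)

lemma pvCanon_pairwise (comp : List String) :
    (pvCanon comp).Pairwise (fun a b => pvKey a ≤ pvKey b) := by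
  have hl : pvMaster.Pairwise (fun a b => pvKey a ≤ pvKey b) := by decide
  unfold pvCanon
  rw [List.pairwise_flatMap]
  refine ⟨fun c _ => by simp [List.pairwise_replicate], ?_⟩
  exact hl.imp (fun hab x hx y hy => by
    rw [List.eq_of_mem_replicate hx, List.eq_of_mem_replicate hy]; exact hab)

lemma pvCanon_perm {comp : List String} (hmem : ∀ a ∈ comp, a ∈ pvMaster) :
    (pvCanon comp).Perm comp := by
  rw [List.perm_iff_count]
  intro v
  by_cases h : v ∈ pvMaster
  · fin_cases h <;> simp [pvCanon, pvMaster, List.count_append, List.count_replicate]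
  · have h0 : comp.count v = 0 := List.count_eq_zero.2 (fun hv => h (hmem v hv))
    simp [pvCanon, pvMaster, List.count_append, List.count_replicate, h0]
    refine ⟨?_, ?_, ?_, ?_, ?_, ?_⟩ <;> (rintro rfl; exact h0)

lemma pvA_eq_canon (dn : List (List (String × String))) :
    create_compartment_list dn = pvCanon (pvCompA dn) := by
  refine pv_eq_of_perm_sorted ?_ ?_ (pvCanon_pairwise _) ?_
  · exact (PySem.List.sorted_perm _ _ _).trans
      (pvCanon_perm (fun a ha => pvCompA_mem_master ha)).symm
  · exact PySem.List.sorted_pairwise _ _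
  · intro a ha
    exact pvCompA_mem_master ((PySem.List.mem_sorted _ _ _ _).1 ha)

-- one step of B's counting loop is the counting fold over that node's compartment letters
lemma pvStepB_eq (d : PySem.Dict String Int) (node : List (String × String)) :
    pvStepB d node = (pvLetterA node).foldl (fun d x => d.insert x (d.getD x 0 + 1)) d := by
  unfold pvStepB pvLetterA
  cases (PySem.Dict.mk node).get? "id" with
  | none => rfl
  | some i =>
    show (match pvNtc.get? i with
          | some letter => d.insert letter (d.getD letter 0 + 1)
          | none => d)
      = List.foldl (fun d x => d.insert x (d.getD x 0 + 1)) d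
          (match pvNtc.get? i with
          | some c => [c]
          | none => [])
    cases pvNtc.get? i <;> rfl

-- B's node loop over the count dictionary IS the counting loop over A's compartment list
lemma pvCounts_eq (dn : List (List (String × String))) (d : PySem.Dict String Int) :
    dn.foldl pvStepB d
    = (pvCompA dn).foldl (fun d x => d.insert x (d.getD x 0 + 1)) d := by
  induction dn generalizing d with
  | nil => rfl
  | cons node rest ih =>
    simp only [List.foldl_cons, pvCompA, List.flatMap_cons, List.foldl_append]
    rw [← pvCompA, pvStepB_eq, ih]

lemma pvB_eq_canon (dn : List (List (String × String))) :
    create_compartment_list_alt dn = pvCanon (pvCompA dn) := by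
  unfold create_compartment_list_alt pvCanon
  rw [pvCounts_eq]
  have hcount : ∀ c : String,
      ((pvCompA dn).foldl (fun d x => d.insert x (d.getD x 0 + 1)) PySem.Dict.empty).getD c 0
        = ((pvCompA dn).count c : Int) := by
    intro c
    rw [PySem.Dict.getD_foldl_insert_add_one]
    simp [PySem.Dict.getD, PySem.Dict.empty, PySem.Dict.get?]
  refine List.flatMap_congr ?_
  intro c _
  rw [hcount c]
  rw [PySem.List.pyRange_one]
  simp [List.map_map, Function.comp_def, List.map_const']

-- ===== VERDICT (by name: the statement is the Claim_ definition above) =====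
theorem create_compartment_list_spec : Claim_equal_create_compartment_list := by
  intro dn _ _
  unfold Spec_create_compartment_list
  rw [pvA_eq_canon, pvB_eq_canon]
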